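-- pv_equiv track=rewrite | github.com/breakologist/hermes-agent | skills/numogram-audio/mod-writer-composer/scripts/composer_extension.py | _gate_distribution
-- ===== SOURCE A (Python) =====
-- from typing import Dict, Tuple, Optional, List
--
-- def _gate_distribution(bias: str, length_estimate: int) -> Dict[int, int]:
--     """
--     Produce a gate → count dict that totals ~ length_estimate * density.
--     For now: simple uniform across all gate values (0‑36), no bias.
--     Phase 5 expansion will inflate one family based on bias.
--     """
--     total_gates = max(1, int(length_estimate * 0.5))
--     # Uniform across all 37 gates
--     per_gate = total_gates // 37
--     remainder = total_gates % 37
--     distrib = {g: per_gate for g in range(37)}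
--     for g in range(remainder):
--         distrib[g] += 1
--     return distrib
-- ===== SOURCE B (Python) =====
-- def _gate_distribution(bias: str, length_estimate: int) -> dict:
--     total_gates = max(1, int(length_estimate * 0.5))
--     # closed-form uniform split: first (total_gates % 37) gates get one extra
--     return {g: (total_gates - g + 36) // 37 for g in range(37)}
-- ===== Notes on version B (the rewrite author's own statement) =====
-- stated objective: simpler
-- what changed: Replaces A's two-pass scheme (uniform fill of all 37 gates, then a second loop incrementing the first remainder gates) by a single comprehension with a closed-form per-gate count (total_gates - g + 36) // 37.
import Mathlib
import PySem

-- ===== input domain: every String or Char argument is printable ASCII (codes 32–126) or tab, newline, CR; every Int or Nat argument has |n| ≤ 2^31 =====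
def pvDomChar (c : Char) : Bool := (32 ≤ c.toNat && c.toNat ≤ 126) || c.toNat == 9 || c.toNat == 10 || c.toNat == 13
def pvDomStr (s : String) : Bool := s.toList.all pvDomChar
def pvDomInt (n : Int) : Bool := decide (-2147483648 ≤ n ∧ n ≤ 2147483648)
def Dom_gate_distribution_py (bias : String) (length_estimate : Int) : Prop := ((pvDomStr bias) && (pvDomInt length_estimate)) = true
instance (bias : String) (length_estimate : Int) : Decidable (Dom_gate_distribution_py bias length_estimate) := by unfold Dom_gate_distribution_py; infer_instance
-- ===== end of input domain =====

-- B replaces A's two-pass dict build (uniform fill then remainder increments) by one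
-- closed-form comprehension; return values proved equal for all inputs in the domain.


-- ===== PORT A =====
-- int(length_estimate * 0.5): the float product is exact for |n| ≤ 2^31 and int()
-- truncates toward zero, which is Int.tdiv n 2 (T-division) — exact on the domain.
def gate_distribution_py (bias : String) (length_estimate : Int) : List (Int × Int) :=
  let total_gates : Int := max 1 (Int.tdiv length_estimate 2)
  let per_gate := PySem.Int.floordiv total_gates 37
  let remainder := PySem.Int.mod total_gates 37
  let distrib := (PySem.List.pyRange 0 37 1).foldl
    (fun d g => d.insert g per_gate) (PySem.Dict.empty : PySem.Dict Int Int)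
  -- distrib[g] += 1 : key g is always present, so modify g 0 (·+1) is exact here
  let distrib := (PySem.List.pyRange 0 remainder 1).foldl
    (fun d g => d.modify g 0 (· + 1)) distrib
  distrib.items

-- ===== PORT B =====
def gate_distribution_py_alt (bias : String) (length_estimate : Int) : List (Int × Int) :=
  let total_gates : Int := max 1 (Int.tdiv length_estimate 2)
  (PySem.List.pyRange 0 37 1).map
    (fun g => (g, PySem.Int.floordiv (total_gates - g + 36) 37))

-- ===== PRECONDITION & SPEC =====
def Spec_gate_distribution_py (bias : String) (length_estimate : Int) (out : List (Int × Int)) : Prop := out = gate_distribution_py_alt bias length_estimate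
instance (bias : String) (length_estimate : Int) (out : List (Int × Int)) : Decidable (Spec_gate_distribution_py bias length_estimate out) := by unfold Spec_gate_distribution_py; infer_instance

-- ===== CLAIM (what is proved, stated in full; the proofs are below) =====
def Claim_equal_gate_distribution_py : Prop := ∀ (bias : String) (length_estimate : Int), Dom_gate_distribution_py bias length_estimate → Spec_gate_distribution_py bias length_estimate (gate_distribution_py bias length_estimate)

-- ===== LEMMAS AND PROOFS =====

-- A's dict after both loops, as an items list, for any total t.
theorem gate_core (t : Int) :
    ((PySem.List.pyRange 0 (PySem.Int.mod t 37) 1).foldl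
        (fun d g => d.modify g 0 (· + 1))
        ((PySem.List.pyRange 0 37 1).foldl
          (fun d g => d.insert g (PySem.Int.floordiv t 37))
          (PySem.Dict.empty : PySem.Dict Int Int))).items
    = (PySem.List.pyRange 0 37 1).map
        (fun g => (g, PySem.Int.floordiv (t - g + 36) 37)) := by
  set p := PySem.Int.floordiv t 37 with hp
  set r := PySem.Int.mod t 37 with hr
  have h37 : (0:Int) < 37 := by norm_num
  have hpe : p = t / 37 := by rw [hp, PySem.Int.floordiv_eq_ediv_of_pos h37]
  have hre : r = t % 37 := by rw [hr, PySem.Int.mod_eq_emod_of_pos h37]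
  set d0 := (PySem.List.pyRange 0 37 1).foldl
      (fun d g => d.insert g p) (PySem.Dict.empty : PySem.Dict Int Int) with hd0
  have hitems0 : d0.items = (PySem.List.pyRange 0 37 1).map (fun g => (g, p)) := by
    rw [hd0]
    have := PySem.Dict.items_foldl_insert_fresh (l := PySem.List.pyRange 0 37 1)
      (k := fun g => g) (v := fun _ => p) (d := (PySem.Dict.empty : PySem.Dict Int Int))
      (by intro a _; simp) (by simpa using PySem.List.nodup_pyRange_one 0 37)
    simpa using this
  have hkeys0 : d0.keys = PySem.List.pyRange 0 37 1 := by
    simp [PySem.Dict.keys, hitems0, List.map_map]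
    exact List.map_id _
  have hnd0 : d0.keys.Nodup := by rw [hkeys0]; exact PySem.List.nodup_pyRange_one 0 37
  set d1 := (PySem.List.pyRange 0 r 1).foldl (fun d g => d.modify g 0 (· + 1)) d0 with hd1
  have hkeys1 : d1.keys = d0.keys := by
    rw [hd1, PySem.Dict.keys_foldl_modify]
    rw [PySem.Set.update_eq_append_filter]
    have : ((PySem.Set.ofList (PySem.List.pyRange 0 r 1)).filter
        (fun y => !(PySem.Set.contains d0.keys y))) = [] := by
      apply List.filter_eq_nil_iff.mpr
      intro a ha
      have ha' : a ∈ PySem.List.pyRange 0 r 1 := by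
        exact (PySem.Set.mem_ofList _ _).mp ha
      have hmem : a ∈ d0.keys := by
        rw [hkeys0]
        rw [PySem.List.mem_pyRange_one] at ha' ⊢
        have hrlt : r < 37 := by rw [hre]; omega
        omega
      simp [PySem.Set.contains, hmem]
    rw [this, List.append_nil]
  have hnd1 : d1.keys.Nodup := by rw [hkeys1]; exact hnd0
  have hget0 : ∀ g ∈ PySem.List.pyRange 0 37 1, d0.getD g 0 = p := by
    intro g hg
    apply PySem.Dict.getD_of_mem_items
    · rw [hitems0]; exact List.mem_map.mpr ⟨g, hg, rfl⟩
    · exact hnd0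
  have hitems1 := PySem.Dict.items_eq_map_keys d1 hnd1 (0 : Int)
  rw [hitems1, hkeys1, hkeys0]
  apply List.map_congr_left
  intro g hg
  have hget1 : d1.getD g 0 = d0.getD g 0 + (PySem.List.pyRange 0 r 1).count g := by
    rw [hd1]; exact PySem.Dict.getD_foldl_modify_add_one _ _ _
  have hgr := (PySem.List.mem_pyRange_one).mp hg
  have hcount : (PySem.List.pyRange 0 r 1).count g = if g < r then 1 else 0 := by
    by_cases hgl : g < r
    · rw [if_pos hgl]
      exact List.count_eq_one_of_mem (PySem.List.nodup_pyRange_one 0 r)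
        (PySem.List.mem_pyRange_one.mpr ⟨hgr.1, hgl⟩)
    · rw [if_neg hgl]
      exact List.count_eq_zero.mpr (fun h => hgl (PySem.List.mem_pyRange_one.mp h).2)
  have hval : PySem.Int.floordiv (t - g + 36) 37 = p + (if g < r then 1 else 0) := by
    rw [PySem.Int.floordiv_eq_ediv_of_pos h37, hpe, hre]
    by_cases hgl : g < t % 37 <;> simp [hgl] <;> omega
  rw [hval, hget1, hget0 g hg, hcount]
  split_ifs <;> norm_num

-- ===== VERDICT (by name: the statement is the Claim_ definition above) =====
theorem gate_distribution_py_spec : Claim_equal_gate_distribution_py := by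
  intro bias n _
  unfold Spec_gate_distribution_py gate_distribution_py gate_distribution_py_alt
  exact gate_core (max 1 (Int.tdiv n 2))
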